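-- pv_equiv track=rewrite | github.com/Matchapy/Trial-kiro-autonomous | src/aws_documentation_integration.py | _extract_overview
-- ===== SOURCE A (Python) =====
-- def _extract_overview(content: str) -> str:
--     """Extract service overview from documentation content"""
--     # Simple extraction - in production would use more sophisticated parsing
--     lines = content.split('\n')
--     for i, line in enumerate(lines):
--         if line.startswith('#') and i + 1 < len(lines):
--             # Get first paragraph after a heading
--             for j in range(i + 1, min(i + 5, len(lines))):
--                 if lines[j].strip() and not lines[j].startswith('#'):
--                     return lines[j].strip()
--
--     return "AWS managed service providing cloud capabilities."
-- ===== SOURCE B (Python) =====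
-- def _extract_overview(content: str) -> str:
--     """Extract service overview from documentation content"""
--     # Single linear pass: a heading opens a 4-line window; return the first
--     # non-empty, non-heading line inside an open window.
--     remaining = 0
--     for line in content.split('\n'):
--         if line.startswith('#'):
--             remaining = 4
--         else:
--             if remaining > 0 and line.strip():
--                 return line.strip()
--             if remaining > 0:
--                 remaining -= 1
--     return "AWS managed service providing cloud capabilities."
-- ===== Notes on version B (the rewrite author's own statement) =====
-- stated objective: simpler
-- what changed: A's nested loops (for every heading, an inner index scan of the next 4 lines) are replaced by a single linear pass over the lines with an integer countdown window that a heading resets to 4.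
import Mathlib
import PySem

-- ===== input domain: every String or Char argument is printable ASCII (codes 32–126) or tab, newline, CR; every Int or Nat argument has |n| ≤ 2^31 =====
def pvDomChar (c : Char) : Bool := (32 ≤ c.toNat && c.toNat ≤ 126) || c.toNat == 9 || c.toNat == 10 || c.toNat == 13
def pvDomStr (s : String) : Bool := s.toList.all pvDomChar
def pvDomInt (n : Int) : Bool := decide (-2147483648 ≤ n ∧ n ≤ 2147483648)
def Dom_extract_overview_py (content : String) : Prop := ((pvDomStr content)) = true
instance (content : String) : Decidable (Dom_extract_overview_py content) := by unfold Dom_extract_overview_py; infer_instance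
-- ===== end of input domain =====

-- B replaces A's nested heading-window scans by one linear pass with a countdown window; same return value everywhere.

-- ===== PORT A =====
-- content.split('\n'): sep ≠ "" so split? is always some; .getD [] only unwraps it
-- inner loop: for j in range(i+1, min(i+5, len(lines))) with early return
-- (indices drawn from the range are always in bounds, so the '' default of pyGetD is never used)
def pvAInner (lines : List String) (js : List Int) : Option String :=
  match js with
  | [] => none
  | j :: rest =>
    let lj := PySem.List.pyGetD lines j ""
    if PySem.Str.strip lj ≠ "" ∧ PySem.Str.startswith lj "#" = false then some (PySem.Str.strip lj)
    else pvAInner lines rest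

-- outer loop: for i, line in enumerate(lines)
def pvAOuter (lines : List String) (items : List (Int × String)) : Option String :=
  match items with
  | [] => none
  | (i, line) :: rest =>
    if PySem.Str.startswith line "#" = true ∧ i + 1 < (lines.length : Int) then
      match pvAInner lines (PySem.List.pyRange (i + 1) (min (i + 5) (lines.length : Int)) 1) with
      | some r => some r
      | none => pvAOuter lines rest
    else pvAOuter lines rest

def extract_overview_py (content : String) : String :=
  let lines := (PySem.Str.split? content "\n").getD []
  match pvAOuter lines (PySem.List.enumerate lines 0) with
  | some r => r
  | none => "AWS managed service providing cloud capabilities."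

-- ===== PORT B =====
-- single pass with the countdown 'remaining'
def pvBLoop (lines : List String) (remaining : Int) : Option String :=
  match lines with
  | [] => none
  | l :: rest =>
    if PySem.Str.startswith l "#" = true then pvBLoop rest 4
    else if remaining > 0 ∧ PySem.Str.strip l ≠ "" then some (PySem.Str.strip l)
    else pvBLoop rest (if remaining > 0 then remaining - 1 else remaining)

def extract_overview_py_alt (content : String) : String :=
  match pvBLoop ((PySem.Str.split? content "\n").getD []) 0 with
  | some r => r
  | none => "AWS managed service providing cloud capabilities."

-- ===== PRECONDITION & SPEC =====
def Spec_extract_overview_py (content : String) (out : String) : Prop := out = extract_overview_py_alt content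
instance (content : String) (out : String) : Decidable (Spec_extract_overview_py content out) := by unfold Spec_extract_overview_py; infer_instance

-- ===== CLAIM (what is proved, stated in full; the proofs are below) =====
def Claim_equal_extract_overview_py : Prop := ∀ (content : String), Dom_extract_overview_py content → Spec_extract_overview_py content (extract_overview_py content)

-- ===== LEMMAS AND PROOFS =====

-- first stripped non-empty non-heading line among the first k lines
def pvScanWin : List String → Nat → Option String
  | _, 0 => none
  | [], _ + 1 => none
  | l :: rest, k + 1 =>
    if PySem.Str.strip l ≠ "" ∧ PySem.Str.startswith l "#" = false then some (PySem.Str.strip l)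
    else pvScanWin rest k

-- structural restatement of A's outer loop
def pvFA : List String → Option String
  | [] => none
  | l :: rest =>
    if PySem.Str.startswith l "#" = true ∧ rest ≠ [] then (pvScanWin rest 4).or (pvFA rest)
    else pvFA rest

theorem pvScanWin_mono (l : List String) : ∀ r s : Nat, r ≤ s →
    (pvScanWin l r).or (pvScanWin l s) = pvScanWin l s := by
  induction l with
  | nil => intro r s _; cases r <;> cases s <;> simp [pvScanWin]
  | cons x rest ih =>
    intro r s hrs
    cases r with
    | zero => simp [pvScanWin]
    | succ r' =>
      cases s with
      | zero => omega
      | succ s' =>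
        simp only [pvScanWin]
        split_ifs with h
        · simp [Option.or]
        · exact ih r' s' (by omega)

theorem pvAInner_eq_scanWin (lines : List String) : ∀ (k j : Nat),
    pvAInner lines (PySem.List.pyRange (j : Int) (min ((j : Int) + k) (lines.length : Int)) 1)
      = pvScanWin (lines.drop j) k := by
  intro k
  induction k with
  | zero =>
    intro j
    rw [PySem.List.pyRange_one_eq_nil (by omega)]
    simp [pvAInner, pvScanWin]
  | succ k ih =>
    intro j
    by_cases hlt : j < lines.length
    · rw [PySem.List.pyRange_one_cons (by push_cast; omega)]
      rw [List.drop_eq_getElem_cons hlt]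
      show pvAInner lines (_ :: _) = pvScanWin _ _
      simp only [pvAInner, pvScanWin]
      rw [PySem.List.pyGetD_eq_getElem lines "" (by positivity) (by exact_mod_cast hlt)]
      simp only [Int.toNat_natCast]
      split_ifs with h
      · rfl
      · have := ih (j + 1)
        rw [show ((j:Int) + 1 = ((j+1 : Nat) : Int)) by push_cast; ring] at *
        rw [show ((j:Int) + (k+1 : Nat) = ((j+1:Nat):Int) + (k:Nat)) by push_cast; ring]
        exact this
    · rw [PySem.List.pyRange_one_eq_nil (by push_cast; omega)]
      rw [List.drop_eq_nil_of_le (by omega)]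
      simp [pvAInner, pvScanWin]

theorem pvAOuter_eq_fA (lines : List String) : ∀ (suffix : List String) (p : Nat),
    lines.drop p = suffix →
    pvAOuter lines (PySem.List.enumerate suffix (p : Int)) = pvFA suffix := by
  intro suffix
  induction suffix with
  | nil => intro p _; simp [PySem.List.enumerate, pvAOuter, pvFA]
  | cons x rest ih =>
    intro p h
    have hlen : lines.length - p = rest.length + 1 := by
      have := congrArg List.length h; simpa using this
    have hp : p < lines.length := by omega
    have hdrop : lines.drop (p+1) = rest := by
      have : (lines.drop p).drop 1 = lines.drop (p+1) := by
        rw [List.drop_drop]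
      rw [← this, h]; simp
    rw [PySem.List.enumerate_cons]
    simp only [pvAOuter, pvFA]
    have hcond : ((p:Int) + 1 < (lines.length : Int)) ↔ rest ≠ [] := by
      cases rest with
      | nil => simp only [List.length_nil] at hlen; simp; omega
      | cons y t => simp only [List.length_cons] at hlen; simp; omega
    have hinner : pvAInner lines (PySem.List.pyRange ((p:Int) + 1) (min ((p:Int) + 5) (lines.length : Int)) 1)
        = pvScanWin rest 4 := by
      have := pvAInner_eq_scanWin lines 4 (p+1)
      rw [hdrop] at this
      rw [show ((p:Int) + 1 = ((p+1:Nat):Int)) by push_cast; ring,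
          show ((p:Int) + 5 = ((p+1:Nat):Int) + (4:Nat)) by push_cast; ring]
      exact this
    by_cases hs : PySem.Str.startswith x "#" = true
    · by_cases hr : rest ≠ []
      · rw [if_pos ⟨hs, hcond.mpr hr⟩, if_pos ⟨hs, hr⟩, hinner]
        cases hsw : pvScanWin rest 4 with
        | some r => simp [Option.or]
        | none =>
          simp only [Option.or]
          rw [show ((p:Int) + 1 = ((p+1:Nat):Int)) by push_cast; ring]
          exact ih (p+1) hdrop
      · rw [if_neg (by tauto), if_neg (by tauto)]
        rw [show ((p:Int) + 1 = ((p+1:Nat):Int)) by push_cast; ring]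
        exact ih (p+1) hdrop
    · rw [if_neg (by tauto), if_neg (by tauto)]
      rw [show ((p:Int) + 1 = ((p+1:Nat):Int)) by push_cast; ring]
      exact ih (p+1) hdrop

theorem pvBLoop_eq (l : List String) : ∀ r : Int, 0 ≤ r → r ≤ 4 →
    pvBLoop l r = (pvScanWin l r.toNat).or (pvFA l) := by
  induction l with
  | nil => intro r _ _; cases h : r.toNat <;> simp [pvBLoop, pvScanWin, pvFA]
  | cons x rest ih =>
    intro r h0 h4
    by_cases hs : PySem.Chars.startswith x.toList ['#'] = true
    · rw [show pvBLoop (x :: rest) r = pvBLoop rest 4 from by simp [pvBLoop, hs]]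
      rw [ih 4 (by norm_num) (by norm_num)]
      by_cases hr : rest = []
      · subst hr
        cases h : r.toNat with
        | zero => simp [pvScanWin, pvFA, Option.or]
        | succ n => cases n <;> simp [pvScanWin, pvFA, hs, Option.or]
      · have hscan : pvScanWin (x :: rest) r.toNat = pvScanWin rest (r.toNat - 1) := by
          cases h : r.toNat with
          | zero => cases h2 : r.toNat - 1 <;> simp_all [pvScanWin]
          | succ n => simp [pvScanWin, hs]
        rw [hscan]
        rw [show pvFA (x :: rest) = (pvScanWin rest 4).or (pvFA rest) from by
          simp [pvFA, hs, hr]]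
        rw [← Option.or_assoc, pvScanWin_mono rest (r.toNat - 1) 4 (by omega)]
        rfl
    · have hs' : PySem.Chars.startswith x.toList ['#'] = false := by simpa using hs
      by_cases hb : r > 0 ∧ PySem.Str.strip x ≠ ""
      · rw [show pvBLoop (x :: rest) r = some (PySem.Str.strip x) from by
          simp [pvBLoop, hs, hb]]
        have : r.toNat = (r.toNat - 1) + 1 := by omega
        rw [this]
        simp [pvScanWin, hb.2, hs', Option.or]
      · have hfa : pvFA (x :: rest) = pvFA rest := by simp [pvFA, hs]
        rw [show pvBLoop (x :: rest) r
            = pvBLoop rest (if r > 0 then r - 1 else r) from by simp [pvBLoop, hs, hb]]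
        by_cases hr0 : r > 0
        · have hblank : PySem.Str.strip x = "" := by tauto
          rw [if_pos hr0, ih (r-1) (by omega) (by omega)]
          have : r.toNat = (r.toNat - 1) + 1 := by omega
          rw [hfa, this]
          simp only [pvScanWin, hblank]
          rw [show (r - 1).toNat = r.toNat - 1 by omega]
          simp
        · have : r = 0 := by omega
          subst this
          rw [if_neg hr0, ih 0 (by norm_num) (by norm_num), hfa]
          simp [pvScanWin]

-- ===== VERDICT (by name: the statement is the Claim_ definition above) =====
theorem extract_overview_py_spec : Claim_equal_extract_overview_py := by
  intro content _
  unfold Spec_extract_overview_py extract_overview_py extract_overview_py_alt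
  have hA := pvAOuter_eq_fA ((PySem.Str.split? content "\n").getD []) ((PySem.Str.split? content "\n").getD []) 0 (by simp)
  have hB := pvBLoop_eq ((PySem.Str.split? content "\n").getD []) 0 (by norm_num) (by norm_num)
  simp only [Int.toNat_zero, pvScanWin, Option.or] at hB
  simp only [Nat.cast_zero] at hA
  simp only [hA, hB]
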